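-- pv_equiv track=rewrite | github.com/darthsoluke/LMMWithTerrain | resources/train_common.py | build_valid_spans
-- ===== SOURCE A (Python) =====
-- def build_valid_spans(range_starts, range_stops, frame_valid):
--     spans = []
--     for start, stop in zip(range_starts, range_stops):
--         i = int(start)
--         stop = int(stop)
--         while i < stop:
--             while i < stop and not frame_valid[i]:
--                 i += 1
--             span_start = i
--             while i < stop and frame_valid[i]:
--                 i += 1
--             if span_start < i:
--                 spans.append((span_start, i))
--     return spans
-- ===== SOURCE B (Python) =====
-- def build_valid_spans(range_starts, range_stops, frame_valid):
--     # Single flat pass per range with an in_span flag (replaces A's nested skip/collect loops).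
--     spans = []
--     for start, stop in zip(range_starts, range_stops):
--         stop = int(stop)
--         in_span = False
--         span_start = 0
--         for i in range(int(start), stop):
--             if frame_valid[i]:
--                 if not in_span:
--                     in_span = True
--                     span_start = i
--             elif in_span:
--                 spans.append((span_start, i))
--                 in_span = False
--         if in_span:
--             spans.append((span_start, stop))
--     return spans
-- ===== Notes on version B (the rewrite author's own statement) =====
-- stated objective: simpler
-- what changed: Replaces A's nested skip-invalid/collect-valid pointer loops with a single flat pass per range maintaining an in_span flag and span_start, emitting a span at each valid-to-invalid transition and at range end.
import Mathlib
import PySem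

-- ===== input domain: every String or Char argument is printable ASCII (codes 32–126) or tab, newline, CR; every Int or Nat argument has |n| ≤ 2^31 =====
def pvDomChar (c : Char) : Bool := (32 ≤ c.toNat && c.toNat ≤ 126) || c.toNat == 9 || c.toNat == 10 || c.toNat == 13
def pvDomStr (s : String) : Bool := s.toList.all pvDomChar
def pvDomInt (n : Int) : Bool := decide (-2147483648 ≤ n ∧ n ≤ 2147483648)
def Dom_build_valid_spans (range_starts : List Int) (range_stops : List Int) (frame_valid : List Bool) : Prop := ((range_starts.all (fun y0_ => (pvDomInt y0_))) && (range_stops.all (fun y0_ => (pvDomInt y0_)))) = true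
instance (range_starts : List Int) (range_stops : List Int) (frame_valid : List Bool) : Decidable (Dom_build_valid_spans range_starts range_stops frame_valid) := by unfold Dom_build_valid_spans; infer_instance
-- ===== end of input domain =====

-- B replaces A's nested skip-invalid/collect-valid pointer loops by one flat pass per range
-- with an in_span flag (objective: simpler decomposition, same cost).

-- ===== PORT A =====
-- inner while: skip invalid frames (frame_valid[i] via pyGetD; Pre_ keeps every visited index in range)
def pvSkip (fv : List Bool) (stop i : Int) : Int :=
  if h : i < stop ∧ PySem.List.pyGetD fv i false = false then pvSkip fv stop (i + 1) else i
termination_by (stop - i).toNat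
decreasing_by omega

-- inner while: collect valid frames
def pvCollect (fv : List Bool) (stop i : Int) : Int :=
  if h : i < stop ∧ PySem.List.pyGetD fv i false = true then pvCollect fv stop (i + 1) else i
termination_by (stop - i).toNat
decreasing_by omega

-- termination facts the outer-while port cites
theorem pvSkip_ge (fv : List Bool) (stop i : Int) : i ≤ pvSkip fv stop i := by
  rw [pvSkip]
  split
  · rename_i h
    have ih := pvSkip_ge fv stop (i + 1)
    omega
  · omega
termination_by (stop - i).toNat
decreasing_by omega

theorem pvCollect_ge (fv : List Bool) (stop i : Int) : i ≤ pvCollect fv stop i := by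
  rw [pvCollect]
  split
  · rename_i h
    have ih := pvCollect_ge fv stop (i + 1)
    omega
  · omega
termination_by (stop - i).toNat
decreasing_by omega

theorem pvProgress (fv : List Bool) (stop i : Int) (h : i < stop) :
    i + 1 ≤ pvCollect fv stop (pvSkip fv stop i) := by
  by_cases hv : PySem.List.pyGetD fv i false = true
  · have hs : pvSkip fv stop i = i := by rw [pvSkip]; simp [hv]
    rw [hs, pvCollect]
    have : i < stop ∧ PySem.List.pyGetD fv i false = true := ⟨h, hv⟩
    rw [dif_pos this]
    exact pvCollect_ge fv stop (i + 1)
  · have hv' : PySem.List.pyGetD fv i false = false := by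
      cases hb : PySem.List.pyGetD fv i false <;> simp_all
    have hs : pvSkip fv stop i = pvSkip fv stop (i + 1) := by
      rw [pvSkip]; simp [h, hv']
    have h1 := pvSkip_ge fv stop (i + 1)
    have h2 := pvCollect_ge fv stop (pvSkip fv stop (i + 1))
    rw [hs]
    omega

-- outer while of A
def pvLoopA (fv : List Bool) (stop i : Int) (spans : List (Int × Int)) : List (Int × Int) :=
  if h : i < stop then
    pvLoopA fv stop (pvCollect fv stop (pvSkip fv stop i))
      (if pvSkip fv stop i < pvCollect fv stop (pvSkip fv stop i) then
        spans ++ [(pvSkip fv stop i, pvCollect fv stop (pvSkip fv stop i))] else spans)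
  else spans
termination_by (stop - i).toNat
decreasing_by
  have := pvProgress fv stop i h
  omega

def build_valid_spans (range_starts : List Int) (range_stops : List Int) (frame_valid : List Bool) : List (Int × Int) :=
  (range_starts.zip range_stops).foldl (fun spans p => pvLoopA frame_valid p.2 p.1 spans) []

-- ===== PORT B =====
-- one step of B's flat scan: state = (spans, in_span, span_start)
def pvStepB (fv : List Bool) (st : List (Int × Int) × Bool × Int) (i : Int) : List (Int × Int) × Bool × Int :=
  if PySem.List.pyGetD fv i false then
    if st.2.1 then st else (st.1, true, i)
  else
    if st.2.1 then (st.1 ++ [(st.2.2, i)], false, st.2.2) else st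

def pvRangeB (fv : List Bool) (start stop : Int) (spans : List (Int × Int)) : List (Int × Int) :=
  let st := (PySem.List.pyRange start stop 1).foldl (pvStepB fv) (spans, false, 0)
  if st.2.1 then st.1 ++ [(st.2.2, stop)] else st.1

def build_valid_spans_alt (range_starts : List Int) (range_stops : List Int) (frame_valid : List Bool) : List (Int × Int) :=
  (range_starts.zip range_stops).foldl (fun spans p => pvRangeB frame_valid p.1 p.2 spans) []

-- ===== PRECONDITION & SPEC =====
-- Pre_ excludes exactly the inputs on which Python A raises IndexError: some visited index i
-- (start ≤ i < stop for a zipped pair) is outside [-len(frame_valid), len(frame_valid)).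
def Pre_build_valid_spans (range_starts : List Int) (range_stops : List Int) (frame_valid : List Bool) : Prop :=
  ∀ p ∈ range_starts.zip range_stops, p.1 < p.2 →
    -(frame_valid.length : Int) ≤ p.1 ∧ p.2 ≤ (frame_valid.length : Int)
instance (range_starts : List Int) (range_stops : List Int) (frame_valid : List Bool) : Decidable (Pre_build_valid_spans range_starts range_stops frame_valid) := by unfold Pre_build_valid_spans; infer_instance

def pvWitness_build_valid_spans : List Int × List Int × List Bool := ([0], [4], [true, false, true, true])

def Spec_build_valid_spans (range_starts : List Int) (range_stops : List Int) (frame_valid : List Bool) (out : List (Int × Int)) : Prop := out = build_valid_spans_alt range_starts range_stops frame_valid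
instance (range_starts : List Int) (range_stops : List Int) (frame_valid : List Bool) (out : List (Int × Int)) : Decidable (Spec_build_valid_spans range_starts range_stops frame_valid out) := by unfold Spec_build_valid_spans; infer_instance

-- ===== CLAIM (what is proved, stated in full; the proofs are below) =====
def Claim_equal_build_valid_spans : Prop := ∀ (range_starts : List Int) (range_stops : List Int) (frame_valid : List Bool), Dom_build_valid_spans range_starts range_stops frame_valid → Pre_build_valid_spans range_starts range_stops frame_valid → Spec_build_valid_spans range_starts range_stops frame_valid (build_valid_spans range_starts range_stops frame_valid)

-- ===== LEMMAS AND PROOFS =====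

-- B's scan from index i with given state, followed by the final flush
def pvFinB (fv : List Bool) (stop i : Int) (st : List (Int × Int) × Bool × Int) : List (Int × Int) :=
  let r := (PySem.List.pyRange i stop 1).foldl (pvStepB fv) st
  if r.2.1 then r.1 ++ [(r.2.2, stop)] else r.1

theorem pvLoopA_skip_step (fv : List Bool) (stop i : Int) (spans : List (Int × Int))
    (hi : i < stop) (hv : PySem.List.pyGetD fv i false = false) :
    pvLoopA fv stop i spans = pvLoopA fv stop (i + 1) spans := by
  have hskip : pvSkip fv stop i = pvSkip fv stop (i + 1) := by
    rw [pvSkip]; simp [hi, hv]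
  by_cases h2 : i + 1 < stop
  · conv_lhs => rw [pvLoopA]
    conv_rhs => rw [pvLoopA]
    simp [hi, h2, hskip]
  · have hskip2 : pvSkip fv stop (i + 1) = i + 1 := by rw [pvSkip]; simp [h2]
    have hcol2 : pvCollect fv stop (i + 1) = i + 1 := by rw [pvCollect]; simp [h2]
    conv_lhs => rw [pvLoopA]
    conv_rhs => rw [pvLoopA]
    simp only [hskip, hskip2, hcol2, dif_pos hi, dif_neg h2, lt_irrefl, if_false]
    rw [pvLoopA]
    simp [h2]

-- the central invariant: B's flat scan equals A's skip/collect loop, for both flag states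
theorem pvMain (fv : List Bool) (stop : Int) : ∀ n i, (stop - i).toNat = n →
    (∀ spans ss, pvFinB fv stop i (spans, false, ss) = pvLoopA fv stop i spans) ∧
    (∀ spans ss, ss < i → i ≤ stop → pvFinB fv stop i (spans, true, ss) =
       pvLoopA fv stop (pvCollect fv stop i) (spans ++ [(ss, pvCollect fv stop i)])) := by
  intro n
  induction n using Nat.strong_induction_on with
  | _ n IH =>
    intro i hn
    by_cases hi : i < stop
    · have hlt : (stop - (i + 1)).toNat < n := by omega
      have IH1 := (IH _ hlt (i + 1) rfl).1
      have IH2 := (IH _ hlt (i + 1) rfl).2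
      have hcons := PySem.List.pyRange_one_cons (a := i) (b := stop) hi
      constructor
      · intro spans ss
        by_cases hv : PySem.List.pyGetD fv i false = true
        · have hstep : pvStepB fv (spans, false, ss) i = (spans, true, i) := by
            simp [pvStepB, hv]
          have lhs : pvFinB fv stop i (spans, false, ss) = pvFinB fv stop (i + 1) (spans, true, i) := by
            simp only [pvFinB, hcons, List.foldl_cons, hstep]
          rw [lhs, IH2 spans i (by omega) (by omega)]
          have hskip : pvSkip fv stop i = i := by rw [pvSkip]; simp [hv]
          have hcol : pvCollect fv stop i = pvCollect fv stop (i + 1) := by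
            rw [pvCollect]; simp [hi, hv]
          have hk := pvCollect_ge fv stop (i + 1)
          conv_rhs => rw [pvLoopA]
          simp only [dif_pos hi, hskip, hcol]
          rw [if_pos (by omega)]
        · have hv' : PySem.List.pyGetD fv i false = false := by
            cases hb : PySem.List.pyGetD fv i false <;> simp_all
          have hstep : pvStepB fv (spans, false, ss) i = (spans, false, ss) := by
            simp [pvStepB, hv']
          have lhs : pvFinB fv stop i (spans, false, ss) = pvFinB fv stop (i + 1) (spans, false, ss) := by
            simp only [pvFinB, hcons, List.foldl_cons, hstep]
          rw [lhs, IH1 spans ss]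
          exact (pvLoopA_skip_step fv stop i spans hi hv').symm
      · intro spans ss hss hle
        by_cases hv : PySem.List.pyGetD fv i false = true
        · have hstep : pvStepB fv (spans, true, ss) i = (spans, true, ss) := by
            simp [pvStepB, hv]
          have lhs : pvFinB fv stop i (spans, true, ss) = pvFinB fv stop (i + 1) (spans, true, ss) := by
            simp only [pvFinB, hcons, List.foldl_cons, hstep]
          rw [lhs, IH2 spans ss (by omega) (by omega)]
          have hcol : pvCollect fv stop i = pvCollect fv stop (i + 1) := by
            rw [pvCollect]; simp [hi, hv]
          rw [hcol]
        · have hv' : PySem.List.pyGetD fv i false = false := by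
            cases hb : PySem.List.pyGetD fv i false <;> simp_all
          have hstep : pvStepB fv (spans, true, ss) i = (spans ++ [(ss, i)], false, ss) := by
            simp [pvStepB, hv']
          have lhs : pvFinB fv stop i (spans, true, ss) =
              pvFinB fv stop (i + 1) (spans ++ [(ss, i)], false, ss) := by
            simp only [pvFinB, hcons, List.foldl_cons, hstep]
          rw [lhs, IH1 (spans ++ [(ss, i)]) ss]
          have hcol : pvCollect fv stop i = i := by rw [pvCollect]; simp [hv']
          rw [hcol]
          exact (pvLoopA_skip_step fv stop i (spans ++ [(ss, i)]) hi hv').symm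
    · have hnil := PySem.List.pyRange_one_eq_nil (show stop ≤ i by omega)
      constructor
      · intro spans ss
        rw [pvLoopA]
        simp [pvFinB, hnil, hi]
      · intro spans ss hss hle
        have hi' : i = stop := by omega
        have hcol : pvCollect fv stop i = i := by rw [pvCollect]; simp [hi]
        rw [hcol, pvLoopA]
        simp [pvFinB, hi']

theorem pvPerRange (fv : List Bool) (start stop : Int) (spans : List (Int × Int)) :
    pvRangeB fv start stop spans = pvLoopA fv stop start spans := by
  have h := (pvMain fv stop ((stop - start).toNat) start rfl).1 spans 0
  simpa [pvRangeB, pvFinB] using h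

-- ===== VERDICT (by name: the statement is the Claim_ definition above) =====
theorem build_valid_spans_spec : Claim_equal_build_valid_spans := by
  unfold Claim_equal_build_valid_spans Spec_build_valid_spans
  intro rs ss fv _ _
  unfold build_valid_spans build_valid_spans_alt
  have hfun : (fun (spans : List (Int × Int)) (p : Int × Int) => pvLoopA fv p.2 p.1 spans) =
      (fun spans p => pvRangeB fv p.1 p.2 spans) := by
    funext spans p
    exact (pvPerRange fv p.1 p.2 spans).symm
  rw [hfun]
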